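-- pv_equiv track=rewrite | github.com/Erispin/mirtop | mirtop/exporter/vcf.py | cigar_length
-- ===== SOURCE A (Python) =====
-- def cigar_length(cigar):
--     """
--     Args:
--         'cigar(str)': CIGAR standard of a compressed alignment representation, this CIGAR omits the '1' integer.
--     Returns:
--         'total_n(int)': CIGAR length in nucleotides.
--     """
--     total_n = 0
--     match_n = "0"
--     for i in cigar:
--         if i.isdigit():
--             match_n = match_n + str(i)
--         else:
--             total_n = total_n + int(match_n) + 1
--             if i == "D" or (i == "M" and match_n != "0"):
--                 total_n = total_n - 1
--             match_n = "0"
--     return(total_n)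
-- ===== SOURCE B (Python) =====
-- def cigar_length(cigar):
--     """Tokenize the CIGAR into (digits, op) pairs by index scanning and sum
--     each pair's contribution, instead of a per-character accumulator."""
--     total = 0
--     i = 0
--     L = len(cigar)
--     while True:
--         j = i
--         while j < L and cigar[j].isdigit():
--             j += 1
--         if j == L:
--             return total
--         d = cigar[i:j]
--         op = cigar[j]
--         total += int("0" + d) + (0 if op == "D" or (op == "M" and d) else 1)
--         i = j + 1
-- ===== Notes on version B (the rewrite author's own statement) =====
-- stated objective: alternative
-- what changed: A is a per-character state machine that grows a digit string accumulator and flushes it at each operator; B instead tokenizes the CIGAR into (digit-run, operator) pairs by index scanning and sums each token's contribution directly.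
import Mathlib
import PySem

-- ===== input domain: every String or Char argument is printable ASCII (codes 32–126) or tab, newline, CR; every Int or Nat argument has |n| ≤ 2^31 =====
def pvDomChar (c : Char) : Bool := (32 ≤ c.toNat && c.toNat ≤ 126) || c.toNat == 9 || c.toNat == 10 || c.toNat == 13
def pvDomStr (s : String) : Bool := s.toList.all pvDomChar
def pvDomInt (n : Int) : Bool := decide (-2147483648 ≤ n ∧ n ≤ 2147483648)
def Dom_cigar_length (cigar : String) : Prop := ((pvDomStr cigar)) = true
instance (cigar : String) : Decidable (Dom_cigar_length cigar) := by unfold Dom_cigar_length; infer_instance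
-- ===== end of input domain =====

-- B replaces A's per-character state machine (string accumulator of digits) by tokenizing
-- the CIGAR into (digit-run, op) pairs and summing each pair's contribution (alternative decomposition).


-- ===== PORT A =====
-- A's loop body: accumulate digits onto match_n (which starts as "0"), otherwise flush.
-- int(match_n) is PySem.Int.ofChars?; match_n is always "0"+digits so Python's int() never
-- raises, and `.getD 0` is never the fallback on any reachable state.
def cigarStepA (s : Int × List Char) (c : Char) : Int × List Char :=
  if PySem.Chars.isdigit c then
    (s.1, s.2 ++ [c])
  else
    let t := s.1 + (PySem.Int.ofChars? s.2).getD 0 + 1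
    let t := if c = 'D' ∨ (c = 'M' ∧ s.2 ≠ ['0']) then t - 1 else t
    (t, ['0'])

def cigar_length (cigar : String) : Int :=
  (cigar.toList.foldl cigarStepA (0, ['0'])).1

-- ===== PORT B =====
-- B's outer while loop over the remaining suffix; the inner `while j < L and cigar[j].isdigit()`
-- plus the slices cigar[i:j] / cigar[j] / position j+1 are exactly takeWhile/dropWhile on the
-- suffix (j is the first non-digit index at or after i). int("0"+d) is ofChars? ('0'::d).
def cigarAltLoop (cs : List Char) : Int :=
  match h : cs.dropWhile PySem.Chars.isdigit with
  | [] => 0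
  | op :: rest =>
      let d := cs.takeWhile PySem.Chars.isdigit
      (PySem.Int.ofChars? ('0' :: d)).getD 0 +
        (if op = 'D' ∨ (op = 'M' ∧ d ≠ []) then 0 else 1) +
        cigarAltLoop rest
termination_by cs.length
decreasing_by
  have hle := List.length_dropWhile_le (p := PySem.Chars.isdigit) (l := cs)
  rw [h] at hle
  simp at hle
  omega

def cigar_length_alt (cigar : String) : Int :=
  cigarAltLoop cigar.toList

-- ===== PRECONDITION & SPEC =====
def Spec_cigar_length (cigar : String) (out : Int) : Prop := out = cigar_length_alt cigar
instance (cigar : String) (out : Int) : Decidable (Spec_cigar_length cigar out) := by unfold Spec_cigar_length; infer_instance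

-- ===== CLAIM (what is proved, stated in full; the proofs are below) =====
def Claim_equal_cigar_length : Prop := ∀ (cigar : String), Dom_cigar_length cigar → Spec_cigar_length cigar (cigar_length cigar)

-- ===== LEMMAS AND PROOFS =====

-- cigarAltLoop with a list ds of already-consumed digits prepended to the current digit run.
def cigarAltLoopGen (ds cs : List Char) : Int :=
  match cs.dropWhile PySem.Chars.isdigit with
  | [] => 0
  | op :: rest =>
      let d := ds ++ cs.takeWhile PySem.Chars.isdigit
      (PySem.Int.ofChars? ('0' :: d)).getD 0 +
        (if op = 'D' ∨ (op = 'M' ∧ d ≠ []) then 0 else 1) +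
        cigarAltLoop rest

theorem cigarAltLoopGen_nil (cs : List Char) : cigarAltLoopGen [] cs = cigarAltLoop cs := by
  unfold cigarAltLoopGen cigarAltLoop
  rcases h : cs.dropWhile PySem.Chars.isdigit with _ | ⟨op, rest⟩ <;> simp
  rw [cigarAltLoop]
  rcases h2 : rest.dropWhile PySem.Chars.isdigit with _ | ⟨op2, r2⟩ <;> simp

theorem cigarAltLoopGen_digit (ds : List Char) (c : Char) (cs : List Char)
    (hc : PySem.Chars.isdigit c = true) :
    cigarAltLoopGen ds (c :: cs) = cigarAltLoopGen (ds ++ [c]) cs := by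
  unfold cigarAltLoopGen
  rw [List.dropWhile_cons_of_pos hc, List.takeWhile_cons_of_pos hc]
  rcases h : cs.dropWhile PySem.Chars.isdigit with _ | ⟨op, rest⟩ <;> simp

theorem cigarAltLoopGen_op (ds : List Char) (c : Char) (cs : List Char)
    (hc : PySem.Chars.isdigit c = false) :
    cigarAltLoopGen ds (c :: cs) =
      (PySem.Int.ofChars? ('0' :: ds)).getD 0 +
        (if c = 'D' ∨ (c = 'M' ∧ ds ≠ []) then 0 else 1) + cigarAltLoop cs := by
  unfold cigarAltLoopGen
  rw [List.dropWhile_cons_of_neg (by simp [hc]), List.takeWhile_cons_of_neg (by simp [hc])]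
  simp

-- loop invariant: A's fold started in state (t, '0'::ds) returns t plus B's generalized sum.
theorem foldA_eq_altGen (cs : List Char) : ∀ (t : Int) (ds : List Char),
    (cs.foldl cigarStepA (t, '0' :: ds)).1 = t + cigarAltLoopGen ds cs := by
  induction cs with
  | nil =>
    intro t ds
    unfold cigarAltLoopGen
    simp
  | cons c cs ih =>
    intro t ds
    by_cases hc : PySem.Chars.isdigit c = true
    · rw [cigarAltLoopGen_digit ds c cs hc]
      have : cigarStepA (t, '0' :: ds) c = (t, '0' :: (ds ++ [c])) := by
        simp [cigarStepA, hc]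
      simp only [List.foldl_cons, this, ih]
    · rw [cigarAltLoopGen_op ds c cs (by simpa using hc)]
      have hne : (('0' :: ds : List Char) ≠ ['0']) ↔ ds ≠ [] := by simp
      have : cigarStepA (t, '0' :: ds) c =
          (t + (PySem.Int.ofChars? ('0' :: ds)).getD 0 +
            (if c = 'D' ∨ (c = 'M' ∧ ds ≠ []) then 0 else 1), '0' :: ([] : List Char)) := by
        simp only [cigarStepA, hc, hne]
        split_ifs <;> simp <;> omega
      simp only [List.foldl_cons, this, ih, cigarAltLoopGen_nil]
      ring

-- ===== VERDICT (by name: the statement is the Claim_ definition above) =====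
theorem cigar_length_spec : Claim_equal_cigar_length := by
  intro cigar _
  unfold Spec_cigar_length cigar_length cigar_length_alt
  rw [foldA_eq_altGen, cigarAltLoopGen_nil]
  ring
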